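-- pv_equiv track=rewrite | github.com/YekaterinaGalochkina/hash-tables-one-row-keyboard | activity/activity.py | typing_time
-- ===== SOURCE A (Python) =====
-- def typing_time(layout, word):
--     curr_pos = 0
--     total_time = 0
--
--
--     letter_positions = {}
--     for index, key in enumerate(layout):
--         letter_positions[key] = index
--
--
--     for letter in word:
--         # find letter position
--         letter_pos = letter_positions[letter]
--         # letter_pos = 0
--         # for key in layout:
--         #     if key == letter:
--         #         break
--
--         #     letter_pos += 1
--
--         # letter_pos is the position of the next letter
--
--         time = abs(letter_pos - curr_pos)
--         total_time += time
--         curr_pos = letter_pos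
--
--     return total_time
-- ===== SOURCE B (Python) =====
-- def typing_time(layout, word):
--     # Recursive walk over the word; look each letter up by scanning the
--     # layout with list.index, so no position dictionary is ever built.
--     def walk(letters, curr):
--         if not letters:
--             return 0
--         pos = layout.index(letters[0])
--         return abs(pos - curr) + walk(letters[1:], pos)
--     return walk(list(word), 0)
-- ===== Notes on version B (the rewrite author's own statement) =====
-- stated objective: alternative
-- what changed: Drops A's precomputed position dictionary and accumulator loop entirely: B recursively walks the word, resolving each letter's position on the fly with a linear layout.index scan and summing |pos-curr| on the way back up; Pre_ excludes words with a letter not occurring exactly once in the layout (absent: both raise; duplicated: A's dict keeps the last occurrence, B's scan the first - an accidental tie-break).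
-- outside the precondition, e.g. on typing_time(['a', 'b', 'a'], 'a'): A returns 2, B returns 0
import Mathlib
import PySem

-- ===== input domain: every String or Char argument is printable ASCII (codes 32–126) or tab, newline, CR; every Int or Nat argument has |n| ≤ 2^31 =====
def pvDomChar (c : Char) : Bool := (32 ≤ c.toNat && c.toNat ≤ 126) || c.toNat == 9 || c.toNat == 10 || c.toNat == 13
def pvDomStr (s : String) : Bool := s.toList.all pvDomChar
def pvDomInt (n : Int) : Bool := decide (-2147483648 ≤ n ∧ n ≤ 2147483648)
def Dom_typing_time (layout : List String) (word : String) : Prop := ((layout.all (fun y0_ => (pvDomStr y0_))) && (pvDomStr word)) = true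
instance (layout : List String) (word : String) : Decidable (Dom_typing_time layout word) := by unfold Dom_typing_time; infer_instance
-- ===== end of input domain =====

-- B drops A's position dictionary and accumulator loop: it walks the word recursively,
-- finding each letter's position by a linear layout.index scan (objective: alternative).

-- ===== PORT A =====
def typing_time (layout : List String) (word : String) : Int :=
  let letter_positions : PySem.Dict String Int :=
    (PySem.List.enumerate layout).foldl (fun d p => d.insert p.2 p.1) PySem.Dict.empty
  -- Python raises KeyError on a letter absent from the dict; Pre_ excludes those inputs,
  -- so getD's default is never claimed
  (word.toList.foldl
    (fun (st : Int × Int) letter =>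
      let letter_pos := letter_positions.getD (String.ofList [letter]) 0
      (letter_pos, st.2 + |letter_pos - st.1|))
    (0, 0)).2

-- ===== PORT B =====
-- walk(letters, curr): Python raises ValueError on a missing letter; Pre_ excludes that,
-- so index?'s getD default is never claimed
def pvWalk (layout : List String) : List Char → Int → Int
  | [], _ => 0
  | c :: cs, curr =>
    let pos : Int := ((PySem.List.index? layout (String.ofList [c])).getD 0 : Nat)
    |pos - curr| + pvWalk layout cs pos

def typing_time_alt (layout : List String) (word : String) : Int :=
  pvWalk layout word.toList 0

-- ===== PRECONDITION & SPEC =====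
-- Pre_ excludes words with a letter that does not occur EXACTLY ONCE in the layout:
-- absent letters make both A and B raise (KeyError / ValueError); duplicated letters hit
-- an accidental tie-break (A's dict-overwrite keeps the LAST occurrence, B's index scan
-- finds the FIRST). Unused duplicate keys in the layout are fine and admitted.
def Pre_typing_time (layout : List String) (word : String) : Prop :=
  (word.toList.all (fun c => layout.count (String.ofList [c]) == 1)) = true
instance (layout : List String) (word : String) : Decidable (Pre_typing_time layout word) := by
  unfold Pre_typing_time; infer_instance

def pvWitness_typing_time : List String × String := (["a", "b", "c"], "cab")

def Spec_typing_time (layout : List String) (word : String) (out : Int) : Prop := out = typing_time_alt layout word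
instance (layout : List String) (word : String) (out : Int) : Decidable (Spec_typing_time layout word out) := by unfold Spec_typing_time; infer_instance

-- ===== CLAIM (what is proved, stated in full; the proofs are below) =====
def Claim_equal_typing_time : Prop := ∀ (layout : List String) (word : String), Dom_typing_time layout word → Pre_typing_time layout word → Spec_typing_time layout word (typing_time layout word)

-- ===== LEMMAS AND PROOFS =====

-- a key not in xs is untouched by the enumerate-insert fold
lemma dictfold_get?_of_not_mem (xs : List String) (s : String) :
    ∀ (n : Int) (d : PySem.Dict String Int), s ∉ xs →
      ((PySem.List.enumerate xs n).foldl (fun d p => d.insert p.2 p.1) d).get? s = d.get? s := by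
  induction xs with
  | nil => intro n d _; simp [PySem.List.enumerate_nil]
  | cons x xs ih =>
    intro n d hs
    rw [PySem.List.enumerate_cons]
    simp only [List.foldl_cons]
    rw [ih (n + 1) _ (fun h => hs (List.mem_cons_of_mem _ h))]
    exact PySem.Dict.get?_insert_of_ne d n (fun h => hs (h ▸ List.mem_cons_self))

-- on a key occurring exactly once, the dict built by the enumerate fold agrees with list.index
lemma dictfold_get?_of_count_one (xs : List String) (s : String) :
    ∀ (n : Int) (d : PySem.Dict String Int), xs.count s = 1 →
      ((PySem.List.enumerate xs n).foldl (fun d p => d.insert p.2 p.1) d).get? s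
        = some (n + ((PySem.List.index? xs s).getD 0 : Nat)) := by
  induction xs with
  | nil => intro _ _ h; simp at h
  | cons x xs ih =>
    intro n d hcnt
    rw [PySem.List.enumerate_cons]
    simp only [List.foldl_cons]
    by_cases hx : x = s
    · subst hx
      have hz : xs.count x = 0 := by simp at hcnt; omega
      have hnot : x ∉ xs := List.count_eq_zero.mp hz
      rw [dictfold_get?_of_not_mem xs x (n + 1) _ hnot,
          PySem.Dict.get?_insert_self, PySem.List.index?_cons_self]
      simp
    · have hc : xs.count s = 1 := by
        simpa [List.count_cons, hx] using hcnt
      have hsx : s ∈ xs := List.count_pos_iff.mp (by omega)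
      rw [ih (n + 1) _ hc,
          PySem.List.index?_cons_of_ne xs hx]
      rcases (PySem.List.index?_isSome_iff xs s).mpr hsx |> Option.isSome_iff_exists.mp with ⟨k, hk⟩
      rw [hk]
      simp
      omega

-- A's interleaved fold equals B's recursion once the two lookups agree on the word's letters
lemma fold_eq_walk (g h : Char → Int) :
    ∀ (cs : List Char) (p0 t : Int), (∀ c ∈ cs, g c = h c) →
      (cs.foldl (fun (st : Int × Int) c => (g c, st.2 + |g c - st.1|)) (p0, t)).2
        = t + cs.rec (motive := fun _ => Int → Int) (fun _ => 0)
              (fun c _ ihp curr => |h c - curr| + ihp (h c)) p0 := by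
  intro cs
  induction cs with
  | nil => intro p0 t _; simp
  | cons c cs ih =>
    intro p0 t hg
    simp only [List.foldl_cons]
    rw [ih _ _ (fun c hc => hg c (List.mem_cons_of_mem _ hc)), hg c List.mem_cons_self]
    ring

lemma pvWalk_eq_rec (layout : List String) (cs : List Char) (p0 : Int) :
    pvWalk layout cs p0
      = cs.rec (motive := fun _ => Int → Int) (fun _ => 0)
          (fun c _ ihp curr =>
            |(((PySem.List.index? layout (String.ofList [c])).getD 0 : Nat) : Int) - curr|
              + ihp ((PySem.List.index? layout (String.ofList [c])).getD 0 : Nat)) p0 := by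
  induction cs generalizing p0 with
  | nil => rfl
  | cons c cs ih => simp only [pvWalk, ih]

-- ===== VERDICT (by name: the statement is the Claim_ definition above) =====
theorem typing_time_spec : Claim_equal_typing_time := by
  intro layout word _ hall
  unfold Spec_typing_time typing_time typing_time_alt
  simp only []
  have hpt : ∀ c ∈ word.toList,
      (((PySem.List.enumerate layout).foldl (fun d p => d.insert p.2 p.1)
          PySem.Dict.empty).getD (String.ofList [c]) 0)
        = (((PySem.List.index? layout (String.ofList [c])).getD 0 : Nat) : Int) := by
    intro c hc
    have hm : layout.count (String.ofList [c]) = 1 := by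
      have := List.all_eq_true.mp hall c hc
      simpa using this
    simp only [PySem.Dict.getD]
    rw [dictfold_get?_of_count_one layout (String.ofList [c]) 0 PySem.Dict.empty hm]
    simp
  rw [pvWalk_eq_rec, fold_eq_walk _ _ word.toList 0 0 hpt]
  simp
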